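-- pv_equiv track=rewrite | github.com/stephanie2000/cs221 | foundations/submission (copy).py | findSingletonWords
-- ===== SOURCE A (Python) =====
-- import collections
--
-- def findSingletonWords(text):
--     """
--     Splits the string |text| by whitespace and returns the set of words that
--     occur exactly once.
--     You might find it useful to use collections.defaultdict(int).
--     """
--     # BEGIN_YOUR_CODE (our solution is 4 lines of code, but don't worry if you deviate from this)
--     d = collections.defaultdict(int)
--     for w in text.split():
--         if w in d.keys():
--             d[w]+=1
--         if w not in d.keys():
--             d[w] = 1
--         if d[w] > 1:
--             d.pop(w)
--
--     return set(d.keys())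
-- ===== SOURCE B (Python) =====
-- import collections
--
-- def findSingletonWords(text):
--     counts = collections.Counter(text.split())
--     return {w for w, c in counts.items() if c == 1}
-- ===== Notes on version B (the rewrite author's own statement) =====
-- stated objective: idiomatic
-- what changed: replaces A's single-pass membership-toggle on a defaultdict (add on odd occurrences, pop on even) with the standard two-phase count-then-filter: build Counter(text.split()) once, then keep the words whose count is exactly 1
-- intended difference: on texts containing a word occurring an odd number of times, at least three, A's pop-on-even toggle wrongly re-adds that word to the result, while B keeps only words whose count is 1, which is what the docstring specifies — e.g. on findSingletonWords("a a a"): A returns ["a"], B returns []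
import Mathlib
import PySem

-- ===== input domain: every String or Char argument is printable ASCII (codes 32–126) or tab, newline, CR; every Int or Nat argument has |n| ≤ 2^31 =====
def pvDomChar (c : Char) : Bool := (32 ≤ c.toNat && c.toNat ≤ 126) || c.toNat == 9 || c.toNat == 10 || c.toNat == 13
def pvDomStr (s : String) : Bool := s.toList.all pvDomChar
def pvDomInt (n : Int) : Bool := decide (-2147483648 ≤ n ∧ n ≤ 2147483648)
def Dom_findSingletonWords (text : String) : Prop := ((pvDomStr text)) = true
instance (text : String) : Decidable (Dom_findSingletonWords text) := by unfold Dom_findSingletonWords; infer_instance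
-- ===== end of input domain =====

-- B replaces A's single-pass membership-toggle on a defaultdict with the idiomatic
-- count-then-filter form (Counter + count==1 comprehension); same O(n) cost.
-- On words occurring an odd number of times >= 3 A's toggle is wrong (see D_ below);
-- B returns the documented 'occur exactly once' answer there.
-- Both Pythons return a SET; its iteration order is not modelled, so both ports
-- canonicalise the returned set value as the sorted list of its elements.

-- ===== PORT A =====
-- one iteration of A's loop body: the three sequential 'if's on the defaultdict
def pvStepA (d : PySem.Dict String Int) (w : String) : PySem.Dict String Int :=
  let d1 := if d.contains w then d.insert w (d.getD w 0 + 1) else d      -- if w in d.keys(): d[w] += 1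
  let d2 := if d1.contains w then d1 else d1.insert w 1                  -- if w not in d.keys(): d[w] = 1
  if d2.getD w 0 > 1 then d2.erase w else d2                             -- if d[w] > 1: d.pop(w)

def findSingletonWords (text : String) : List String :=
  let d := (PySem.Str.split₀ text).foldl pvStepA PySem.Dict.empty
  PySem.List.sorted (PySem.Set.ofList d.keys) (fun x => x) false         -- return set(d.keys()), canonicalised

-- ===== PORT B =====
def findSingletonWords_alt (text : String) : List String :=
  let counts := PySem.Dict.counter (PySem.Str.split₀ text)
  PySem.List.sorted
    (PySem.Set.ofList ((counts.items.filter (fun p => p.2 == 1)).map (fun p => p.1)))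
    (fun x => x) false                                                   -- {w for w,c in counts.items() if c == 1}, canonicalised

-- ===== PRECONDITION & SPEC =====
-- A's toggle re-adds a word on its 3rd, 5th, ... occurrence, so on texts with a word of odd
-- count >= 3 A returns that word although it does not occur exactly once; B omits it as documented.
def D_findSingletonWords (text : String) : Prop :=
  ∃ w ∈ PySem.Str.split₀ text,
    3 ≤ (PySem.Str.split₀ text).count w ∧ (PySem.Str.split₀ text).count w % 2 = 1
instance (text : String) : Decidable (D_findSingletonWords text) := by
  unfold D_findSingletonWords; infer_instance

def Spec_findSingletonWords (text : String) (out : List String) : Prop :=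
  ¬ D_findSingletonWords text → out = findSingletonWords_alt text
instance (text : String) (out : List String) : Decidable (Spec_findSingletonWords text out) := by unfold Spec_findSingletonWords; infer_instance

def pvDiffWitness_findSingletonWords : String := "a a a"
def pvDiffWitnessOut_findSingletonWords : (List String) × (List String) := (["a"], [])

-- ===== CLAIM (what is proved, stated in full; the proofs are below) =====
def Claim_unchanged_findSingletonWords : Prop :=
  ∀ (text : String), Dom_findSingletonWords text → Spec_findSingletonWords text (findSingletonWords text)
def Claim_changed_findSingletonWords : Prop :=
  Dom_findSingletonWords (pvDiffWitness_findSingletonWords) ∧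
  D_findSingletonWords (pvDiffWitness_findSingletonWords) ∧
  findSingletonWords (pvDiffWitness_findSingletonWords) = pvDiffWitnessOut_findSingletonWords.1 ∧
  findSingletonWords_alt (pvDiffWitness_findSingletonWords) = pvDiffWitnessOut_findSingletonWords.2 ∧
  pvDiffWitnessOut_findSingletonWords.1 ≠ pvDiffWitnessOut_findSingletonWords.2
def Claim_exact_findSingletonWords : Prop :=
  ∀ (text : String), Dom_findSingletonWords text → D_findSingletonWords text →
    findSingletonWords text ≠ findSingletonWords_alt text

-- ===== LEMMAS AND PROOFS =====

lemma pv_find?_filter (l : List (String × Int)) (k k' : String) (h : ¬ k' = k) :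
    List.find? (fun p => p.1 == k') (l.filter (fun p => !(p.1 == k))) =
      List.find? (fun p => p.1 == k') l := by
  induction l with
  | nil => rfl
  | cons p l ih =>
    by_cases hp : p.1 = k
    · have hq : ¬ p.1 = k' := fun e => h (e ▸ hp)
      have hkk : (k == k') = false := by
        simp only [beq_eq_false_iff_ne, ne_eq]
        exact fun e => h e.symm
      simp [hp, hkk, ih]
    · by_cases hq : p.1 = k'
      · simp [hq, h]
      · simp [hp, hq, ih]

lemma pv_get?_erase (d : PySem.Dict String Int) (k k' : String) :
    (d.erase k).get? k' = if k' = k then none else d.get? k' := by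
  simp only [PySem.Dict.erase, PySem.Dict.get?]
  by_cases hk : k' = k
  · subst hk
    rw [List.find?_eq_none.mpr, if_pos rfl]
    · rfl
    · intro p hp
      have := List.of_mem_filter hp
      simpa using this
  · rw [if_neg hk, pv_find?_filter d.items k k' hk]

lemma pv_keys_erase_sublist (d : PySem.Dict String Int) (k : String) :
    (d.erase k).keys.Sublist d.keys :=
  List.Sublist.map _ List.filter_sublist

-- what one loop iteration of A does to the dictionary, on states whose values are all 1
lemma pv_stepA_get? (d : PySem.Dict String Int) (w k : String)
    (hv : ∀ k, d.get? k = none ∨ d.get? k = some 1) :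
    (pvStepA d w).get? k =
      if k = w then (if (d.get? w).isSome then none else some 1) else d.get? k := by
  unfold pvStepA
  by_cases hc : d.contains w = true
  · have hs : (d.get? w).isSome = true := by rw [← PySem.Dict.contains_eq_isSome_get?]; exact hc
    have h1 : d.get? w = some 1 := by
      rcases hv w with h | h
      · rw [h] at hs; simp at hs
      · exact h
    have hg : d.getD w 0 = 1 := by rw [PySem.Dict.getD_eq_get?_getD, h1]; rfl
    have hc1 : (d.insert w (d.getD w 0 + 1)).contains w = true := by
      rw [PySem.Dict.contains_eq_isSome_get?, PySem.Dict.get?_insert]; simp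
    have hg1 : (d.insert w (d.getD w 0 + 1)).getD w 0 = 2 := by
      rw [PySem.Dict.getD_eq_get?_getD, PySem.Dict.get?_insert]; simp [hg]
    simp only [hc, if_true, hc1, hg1]
    norm_num
    rw [pv_get?_erase]
    by_cases hk : k = w
    · simp [hk, hs]
    · simp [hk, PySem.Dict.get?_insert]
  · have hs : (d.get? w).isSome = false := by
      rw [← PySem.Dict.contains_eq_isSome_get?]; simpa using hc
    have hc' : d.contains w = false := by simpa using hc
    have hg1 : (d.insert w 1).getD w 0 = 1 := by
      rw [PySem.Dict.getD_eq_get?_getD, PySem.Dict.get?_insert]; simp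
    simp only [hc', Bool.false_eq_true, if_false, hg1]
    norm_num
    rw [PySem.Dict.get?_insert]
    by_cases hk : k = w <;> simp [hk, hs]

lemma pv_stepA_hv (d : PySem.Dict String Int) (w : String)
    (hv : ∀ k, d.get? k = none ∨ d.get? k = some 1) :
    ∀ k, (pvStepA d w).get? k = none ∨ (pvStepA d w).get? k = some 1 := by
  intro k
  rw [pv_stepA_get? d w k hv]
  by_cases hk : k = w
  · by_cases hs : (d.get? w).isSome <;> simp [hk, hs]
  · simp [hk]; exact hv k

lemma pv_stepA_nodup (d : PySem.Dict String Int) (w : String)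
    (hn : d.keys.Nodup) : (pvStepA d w).keys.Nodup := by
  unfold pvStepA
  by_cases hc : d.contains w = true
  · have hc1 : (d.insert w (d.getD w 0 + 1)).contains w = true := by
      rw [PySem.Dict.contains_eq_isSome_get?, PySem.Dict.get?_insert]; simp
    simp only [hc, if_true, hc1]
    split
    · exact (PySem.Dict.nodup_keys_insert _ _ _ hn).sublist (pv_keys_erase_sublist _ _)
    · exact PySem.Dict.nodup_keys_insert _ _ _ hn
  · have hc' : d.contains w = false := by simpa using hc
    simp only [hc', Bool.false_eq_true, if_false]
    split
    · exact (PySem.Dict.nodup_keys_insert _ _ _ hn).sublist (pv_keys_erase_sublist _ _)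
    · exact PySem.Dict.nodup_keys_insert _ _ _ hn

-- A's loop computes, for each key, 'present iff the parity of its count so far flipped'
lemma pv_loopA (ws : List String) (d : PySem.Dict String Int)
    (hv : ∀ k, d.get? k = none ∨ d.get? k = some 1) (k : String) :
    (ws.foldl pvStepA d).get? k =
      if ((d.get? k).isSome ^^ decide (ws.count k % 2 = 1)) then some 1 else none := by
  induction ws generalizing d with
  | nil =>
    simp only [List.foldl_nil, List.count_nil]
    rcases hv k with h | h <;> simp [h]
  | cons w t ih =>
    simp only [List.foldl_cons]
    rw [ih (pvStepA d w) (pv_stepA_hv d w hv)]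
    rw [pv_stepA_get? d w k hv]
    by_cases hk : k = w
    · subst hk
      by_cases hs : (d.get? k).isSome
      · have : t.count k % 2 = 1 ↔ ¬ ((k :: t).count k % 2 = 1) := by
          simp; omega
        by_cases hp : t.count k % 2 = 1 <;> simp_all
      · have : t.count k % 2 = 1 ↔ ¬ ((k :: t).count k % 2 = 1) := by
          simp; omega
        by_cases hp : t.count k % 2 = 1 <;> simp_all
    · have : (w :: t).count k = t.count k := by simp [Ne.symm hk]
      simp [hk, this]

lemma pv_loopA_nodup (ws : List String) (d : PySem.Dict String Int)
    (hn : d.keys.Nodup) : (ws.foldl pvStepA d).keys.Nodup := by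
  induction ws generalizing d with
  | nil => exact hn
  | cons w t ih => exact ih _ (pv_stepA_nodup d w hn)

lemma pv_mem_keys_loopA (ws : List String) (k : String) :
    k ∈ (ws.foldl pvStepA PySem.Dict.empty).keys ↔ ws.count k % 2 = 1 := by
  have hv : ∀ k, (PySem.Dict.empty (κ := String) (ν := Int)).get? k = none ∨
      (PySem.Dict.empty (κ := String) (ν := Int)).get? k = some 1 := by
    intro k; left; rfl
  have h := pv_loopA ws PySem.Dict.empty hv k
  have hm : k ∈ (ws.foldl pvStepA PySem.Dict.empty).keys ↔
      ((ws.foldl pvStepA PySem.Dict.empty).get? k).isSome = true := by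
    rw [← PySem.Dict.contains_eq_isSome_get?, PySem.Dict.contains_eq_decide_mem_keys]
    simp
  rw [hm, h]
  have hempty : (PySem.Dict.empty (κ := String) (ν := Int)).get? k = none := rfl
  by_cases hp : ws.count k % 2 = 1 <;> simp [hempty, hp]

-- B's filtered counter, unfolded to a filter of the deduplicated word list
lemma pv_B_list (ws : List String) :
    (((PySem.Dict.counter ws).items.filter (fun p => p.2 == 1)).map (fun p => p.1)) =
      (PySem.Set.ofList ws).filter (fun k => ws.count k == 1) := by
  rw [PySem.Dict.items_counter]
  rw [List.filter_map]
  rw [List.map_map]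
  have hpred : ∀ k ∈ PySem.Set.ofList ws,
      ((fun p : String × Int => p.2 == 1) ∘ fun k => (k, (ws.count k : Int))) k =
        (fun k => ws.count k == 1) k := by
    intro k _
    simp only [Function.comp_apply]
    by_cases hp : ws.count k = 1
    · simp [hp]
    · have hip : ((ws.count k : Int)) ≠ 1 := by exact_mod_cast hp
      simp [hp, hip]
  rw [List.filter_congr hpred]
  have hid : ((fun p : String × Int => p.1) ∘ fun k => (k, (ws.count k : Int))) = id := rfl
  rw [hid, List.map_id]

lemma pv_mem_B (ws : List String) (k : String) :
    k ∈ ((PySem.Set.ofList ws).filter (fun k => ws.count k == 1)) ↔ ws.count k = 1 := by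
  simp only [List.mem_filter, PySem.Set.mem_ofList, beq_iff_eq]
  constructor
  · exact fun h => h.2
  · intro h
    refine ⟨?_, h⟩
    exact List.count_pos_iff.mp (by omega)

lemma pv_mem_A (ws : List String) (k : String) :
    k ∈ PySem.List.sorted (PySem.Set.ofList
        ((ws.foldl pvStepA PySem.Dict.empty).keys)) (fun x => x) false ↔
      ws.count k % 2 = 1 := by
  rw [PySem.List.mem_sorted, PySem.Set.mem_ofList, pv_mem_keys_loopA]

-- ===== VERDICT (by name: the statement is the Claim_ definition above) =====
theorem findSingletonWords_spec : Claim_unchanged_findSingletonWords := by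
  intro text _ hD
  unfold findSingletonWords findSingletonWords_alt
  set ws := PySem.Str.split₀ text with hws
  simp only
  rw [pv_B_list ws]
  have hnA : (ws.foldl pvStepA PySem.Dict.empty).keys.Nodup :=
    pv_loopA_nodup ws PySem.Dict.empty PySem.Dict.nodup_keys_empty
  have hnB : ((PySem.Set.ofList ws).filter (fun k => ws.count k == 1)).Nodup :=
    (PySem.Set.nodup_ofList ws).filter _
  rw [PySem.Set.ofList_eq_self_of_nodup _ hnA, PySem.Set.ofList_eq_self_of_nodup _ hnB]
  apply PySem.List.sorted_eq_sorted_of_perm _ _ _ (fun a b h => h)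
  rw [List.perm_ext_iff_of_nodup hnA hnB]
  intro k
  rw [pv_mem_keys_loopA, pv_mem_B]
  constructor
  · intro hodd
    by_cases h3 : 3 ≤ ws.count k
    · exact absurd ⟨k, List.count_pos_iff.mp (by rw [← hws]; omega), h3, hodd⟩ hD
    · omega
  · intro h1; omega

theorem findSingletonWords_changed : Claim_changed_findSingletonWords := by
  unfold Claim_changed_findSingletonWords; decide

theorem findSingletonWords_tight : Claim_exact_findSingletonWords := by
  intro text _ hD heq
  obtain ⟨w, hw, h3, hodd⟩ := hD
  unfold findSingletonWords findSingletonWords_alt at heq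
  set ws := PySem.Str.split₀ text with hws
  simp only at heq
  have hA : w ∈ PySem.List.sorted (PySem.Set.ofList
      ((ws.foldl pvStepA PySem.Dict.empty).keys)) (fun x => x) false :=
    (pv_mem_A ws w).mpr hodd
  rw [heq] at hA
  rw [PySem.List.mem_sorted, PySem.Set.mem_ofList, pv_B_list ws, pv_mem_B] at hA
  omega
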